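-- pv_equiv track=rewrite | github.com/wesleyburnawan/studycle | Rectangle_Checker.py | points_on_rectangle
-- ===== SOURCE A (Python) =====
-- def points_on_rectangle(coordinates, p1, p2, p3, p4):
--     p1_to_p2_distance = (coordinates[p1][0] - coordinates[p2][0])**2 + (coordinates[p1][1] - coordinates[p2][1])**2
--     p1_to_p3_distance = (coordinates[p1][0] - coordinates[p3][0])**2 + (coordinates[p1][1] - coordinates[p3][1])**2
--     p1_to_p4_distance = (coordinates[p1][0] - coordinates[p4][0])**2 + (coordinates[p1][1] - coordinates[p4][1])**2
--     for point in range(len(coordinates)):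
--         if coordinates[point] == coordinates[p1] or coordinates[point] == coordinates[p2] or coordinates[point] == coordinates[p3] or coordinates[point] == coordinates[p4]:
--             continue
--         #Get the coordinate not connected to p1 through a line
--         if(max(p1_to_p2_distance, p1_to_p3_distance, p1_to_p4_distance) == p1_to_p2_distance):
--             if(is_between(coordinates, p1, p3, point) == False and is_between(coordinates, p1, p4, point) == False and
--             is_between(coordinates, p2, p3, point) == False and is_between(coordinates, p2, p4, point) == False):
--                 return False
--         elif(max(p1_to_p2_distance, p1_to_p3_distance, p1_to_p4_distance) == p1_to_p3_distance):
--             if(is_between(coordinates, p1, p2, point) == False and is_between(coordinates, p1, p4, point) == False and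
--             is_between(coordinates, p3, p2, point) == False and is_between(coordinates, p3, p4, point) == False):
--                 return False
--         else:
--             if(is_between(coordinates, p1, p3, point) == False and is_between(coordinates, p1, p2, point) == False and
--             is_between(coordinates, p4, p3, point) == False and is_between(coordinates, p4, p2, point) == False):
--                 return False
--     return True
--
-- def is_between(coordinates, p1, p2, p3):
--     cross_product = (coordinates[p3][1] - coordinates[p1][1]) * (coordinates[p2][0] - coordinates[p1][0]) - (coordinates[p3][0] - coordinates[p1][0]) * (coordinates[p2][1] - coordinates[p1][1])
--     if cross_product != 0:
--         return False
--
--     dot_product = (coordinates[p3][0] - coordinates[p1][0]) * (coordinates[p2][0] - coordinates[p1][0]) + (coordinates[p3][1] - coordinates[p1][1]) * (coordinates[p2][1] - coordinates[p1][1])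
--     if dot_product < 0:
--         return False
--
--     squared_length_p1_p2 = (coordinates[p2][0] - coordinates[p1][0])**2 + (coordinates[p2][1] - coordinates[p1][1])**2
--     if dot_product > squared_length_p1_p2:
--         return False
--     return True
-- ===== SOURCE B (Python) =====
-- def points_on_rectangle(coordinates, p1, p2, p3, p4):
--     # pick the corner diagonal to p1 (farthest by squared distance, first wins ties)
--     def sq(q):
--         return (coordinates[p1][0] - coordinates[q][0]) ** 2 + (coordinates[p1][1] - coordinates[q][1]) ** 2
--     diag, o1, o2 = max([(p2, p3, p4), (p3, p2, p4), (p4, p3, p2)], key=lambda t: sq(t[0]))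
--     corner_vals = [coordinates[p] for p in (p1, p2, p3, p4)]
--     # sieve: drop corner-valued points, then drop the points lying on each edge in turn
--     remaining = [pt for pt in range(len(coordinates)) if coordinates[pt] not in corner_vals]
--     for a, b in ((p1, o1), (p1, o2), (diag, o1), (diag, o2)):
--         remaining = [pt for pt in remaining if not is_between(coordinates, a, b, pt)]
--     return not remaining
--
-- def is_between(coordinates, p1, p2, p3):
--     cross_product = (coordinates[p3][1] - coordinates[p1][1]) * (coordinates[p2][0] - coordinates[p1][0]) - (coordinates[p3][0] - coordinates[p1][0]) * (coordinates[p2][1] - coordinates[p1][1])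
--     if cross_product != 0:
--         return False
--
--     dot_product = (coordinates[p3][0] - coordinates[p1][0]) * (coordinates[p2][0] - coordinates[p1][0]) + (coordinates[p3][1] - coordinates[p1][1]) * (coordinates[p2][1] - coordinates[p1][1])
--     if dot_product < 0:
--         return False
--
--     squared_length_p1_p2 = (coordinates[p2][0] - coordinates[p1][0])**2 + (coordinates[p2][1] - coordinates[p1][1])**2
--     if dot_product > squared_length_p1_p2:
--         return False
--     return True
-- ===== Notes on version B (the rewrite author's own statement) =====
-- stated objective: alternative
-- what changed: B picks the diagonal corner once with max(key=squared distance) and then sieves the index list in staged filtering passes (drop corner-valued points, then drop the points lying on each of the four edges in turn) and tests whether anything remains, instead of A's single early-return loop that recomputes max() per point and branches three ways.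
import Mathlib
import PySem

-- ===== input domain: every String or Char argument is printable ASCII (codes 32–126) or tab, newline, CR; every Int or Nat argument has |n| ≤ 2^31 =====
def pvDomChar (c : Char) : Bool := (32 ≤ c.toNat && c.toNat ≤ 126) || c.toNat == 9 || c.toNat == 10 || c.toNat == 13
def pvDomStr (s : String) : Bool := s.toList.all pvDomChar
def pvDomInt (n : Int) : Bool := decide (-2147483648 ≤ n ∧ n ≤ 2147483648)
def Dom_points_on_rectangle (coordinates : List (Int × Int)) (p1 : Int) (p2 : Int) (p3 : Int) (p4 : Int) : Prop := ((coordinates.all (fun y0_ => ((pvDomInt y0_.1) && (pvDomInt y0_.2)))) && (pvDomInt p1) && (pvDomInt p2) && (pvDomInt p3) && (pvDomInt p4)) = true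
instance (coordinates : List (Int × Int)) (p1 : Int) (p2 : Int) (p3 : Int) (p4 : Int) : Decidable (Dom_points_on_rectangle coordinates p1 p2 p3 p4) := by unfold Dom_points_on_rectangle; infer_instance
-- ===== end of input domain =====

-- B replaces A's early-return loop (per-point max() recomputation + three hard-coded
-- branches) by: pick the diagonal corner once with max(key=...), then sieve the index
-- list in staged passes — drop corner-valued points, then drop the points on each of
-- the four edges in turn — and test whether anything remains; same O(n) cost.


-- ===== PORT A =====
-- coordinates[i]; total with a default, exact under Pre_ (Raise.InRange for every index used)
def pvGetPt (coords : List (Int × Int)) (i : Int) : Int × Int :=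
  PySem.List.pyGetD coords i (0, 0)

-- (x1-x2)**2 + (y1-y2)**2, the squared-distance expression both Pythons write out
def pvSqDist (a b : Int × Int) : Int :=
  (a.1 - b.1) ^ 2 + (a.2 - b.2) ^ 2

-- is_between, shared verbatim by both Pythons
def isBetween (coords : List (Int × Int)) (p1 p2 p3 : Int) : Bool :=
  let c1 := pvGetPt coords p1
  let c2 := pvGetPt coords p2
  let c3 := pvGetPt coords p3
  let cross := (c3.2 - c1.2) * (c2.1 - c1.1) - (c3.1 - c1.1) * (c2.2 - c1.2)
  if cross ≠ 0 then false
  else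
    let dot := (c3.1 - c1.1) * (c2.1 - c1.1) + (c3.2 - c1.2) * (c2.2 - c1.2)
    if dot < 0 then false
    else
      let sq := (c2.1 - c1.1) ^ 2 + (c2.2 - c1.2) ^ 2
      if dot > sq then false else true

-- A's for-loop with early `return False`
def porLoopA (coords : List (Int × Int)) (p1 p2 p3 p4 d2 d3 d4 : Int) : List Int → Bool
  | [] => true
  | pt :: rest =>
    if pvGetPt coords pt = pvGetPt coords p1 ∨ pvGetPt coords pt = pvGetPt coords p2 ∨
       pvGetPt coords pt = pvGetPt coords p3 ∨ pvGetPt coords pt = pvGetPt coords p4 then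
      porLoopA coords p1 p2 p3 p4 d2 d3 d4 rest
    else if max d2 (max d3 d4) = d2 then
      if isBetween coords p1 p3 pt = false ∧ isBetween coords p1 p4 pt = false ∧
         isBetween coords p2 p3 pt = false ∧ isBetween coords p2 p4 pt = false then false
      else porLoopA coords p1 p2 p3 p4 d2 d3 d4 rest
    else if max d2 (max d3 d4) = d3 then
      if isBetween coords p1 p2 pt = false ∧ isBetween coords p1 p4 pt = false ∧
         isBetween coords p3 p2 pt = false ∧ isBetween coords p3 p4 pt = false then false
      else porLoopA coords p1 p2 p3 p4 d2 d3 d4 rest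
    else
      if isBetween coords p1 p3 pt = false ∧ isBetween coords p1 p2 pt = false ∧
         isBetween coords p4 p3 pt = false ∧ isBetween coords p4 p2 pt = false then false
      else porLoopA coords p1 p2 p3 p4 d2 d3 d4 rest

def points_on_rectangle (coordinates : List (Int × Int)) (p1 : Int) (p2 : Int) (p3 : Int) (p4 : Int) : Bool :=
  porLoopA coordinates p1 p2 p3 p4
    (pvSqDist (pvGetPt coordinates p1) (pvGetPt coordinates p2))
    (pvSqDist (pvGetPt coordinates p1) (pvGetPt coordinates p3))
    (pvSqDist (pvGetPt coordinates p1) (pvGetPt coordinates p4))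
    (PySem.List.pyRange 0 coordinates.length 1)

-- ===== PORT B =====
def points_on_rectangle_alt (coordinates : List (Int × Int)) (p1 : Int) (p2 : Int) (p3 : Int) (p4 : Int) : Bool :=
  -- max(options, key=...); the literal 3-list is non-empty, so max? is some and getD's default is never used
  let dso : Int × Int × Int :=
    (PySem.List.max? [(p2, p3, p4), (p3, p2, p4), (p4, p3, p2)]
      (fun t => pvSqDist (pvGetPt coordinates p1) (pvGetPt coordinates t.1))).getD (p2, p3, p4)
  let cornerVals : List (Int × Int) := [p1, p2, p3, p4].map (pvGetPt coordinates)
  let remaining0 : List Int :=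
    (PySem.List.pyRange 0 coordinates.length 1).filter
      (fun pt => !(cornerVals.contains (pvGetPt coordinates pt)))
  let remaining : List Int :=
    [(p1, dso.2.1), (p1, dso.2.2), (dso.1, dso.2.1), (dso.1, dso.2.2)].foldl
      (fun rem e => rem.filter (fun pt => !isBetween coordinates e.1 e.2 pt)) remaining0
  remaining.isEmpty

-- ===== PRECONDITION & SPEC =====
-- Python A raises IndexError when any of p1..p4 is out of range as an index into coordinates.
def Pre_points_on_rectangle (coordinates : List (Int × Int)) (p1 : Int) (p2 : Int) (p3 : Int) (p4 : Int) : Prop :=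
  PySem.Raise.InRange coordinates.length p1 ∧ PySem.Raise.InRange coordinates.length p2 ∧
  PySem.Raise.InRange coordinates.length p3 ∧ PySem.Raise.InRange coordinates.length p4
instance (coordinates : List (Int × Int)) (p1 : Int) (p2 : Int) (p3 : Int) (p4 : Int) : Decidable (Pre_points_on_rectangle coordinates p1 p2 p3 p4) := by unfold Pre_points_on_rectangle; infer_instance
def pvWitness_points_on_rectangle : (List (Int × Int)) × Int × Int × Int × Int :=
  ([(0, 0), (2, 0), (0, 1), (2, 1)], 0, 3, 1, 2)

def Spec_points_on_rectangle (coordinates : List (Int × Int)) (p1 : Int) (p2 : Int) (p3 : Int) (p4 : Int) (out : Bool) : Prop := out = points_on_rectangle_alt coordinates p1 p2 p3 p4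
instance (coordinates : List (Int × Int)) (p1 : Int) (p2 : Int) (p3 : Int) (p4 : Int) (out : Bool) : Decidable (Spec_points_on_rectangle coordinates p1 p2 p3 p4 out) := by unfold Spec_points_on_rectangle; infer_instance

-- ===== CLAIM =====
def Claim_equal_points_on_rectangle : Prop := ∀ (coordinates : List (Int × Int)) (p1 : Int) (p2 : Int) (p3 : Int) (p4 : Int), Dom_points_on_rectangle coordinates p1 p2 p3 p4 → Pre_points_on_rectangle coordinates p1 p2 p3 p4 → Spec_points_on_rectangle coordinates p1 p2 p3 p4 (points_on_rectangle coordinates p1 p2 p3 p4)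

-- ===== LEMMAS AND PROOFS =====

-- if none of the four is_between results is True, `return False`; else the or of them is True
lemma or4_true (a b c d : Bool) (h : ¬(a = false ∧ b = false ∧ c = false ∧ d = false)) :
    (a || b || c || d) = true := by
  cases a <;> cases b <;> cases c <;> cases d <;> simp_all

-- A's loop is an `all` of its per-point test
lemma porLoopA_eq_all (coords : List (Int × Int)) (p1 p2 p3 p4 d2 d3 d4 : Int) (l : List Int) :
    porLoopA coords p1 p2 p3 p4 d2 d3 d4 l =
    l.all (fun pt =>
      decide (pvGetPt coords pt = pvGetPt coords p1 ∨ pvGetPt coords pt = pvGetPt coords p2 ∨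
              pvGetPt coords pt = pvGetPt coords p3 ∨ pvGetPt coords pt = pvGetPt coords p4) ||
      (if max d2 (max d3 d4) = d2 then
        isBetween coords p1 p3 pt || isBetween coords p1 p4 pt ||
        isBetween coords p2 p3 pt || isBetween coords p2 p4 pt
      else if max d2 (max d3 d4) = d3 then
        isBetween coords p1 p2 pt || isBetween coords p1 p4 pt ||
        isBetween coords p3 p2 pt || isBetween coords p3 p4 pt
      else
        isBetween coords p1 p3 pt || isBetween coords p1 p2 pt ||
        isBetween coords p4 p3 pt || isBetween coords p4 p2 pt)) := by
  induction l with
  | nil => simp [porLoopA]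
  | cons pt rest ih =>
    simp only [porLoopA, List.all_cons, ih]
    by_cases hs : pvGetPt coords pt = pvGetPt coords p1 ∨ pvGetPt coords pt = pvGetPt coords p2 ∨
        pvGetPt coords pt = pvGetPt coords p3 ∨ pvGetPt coords pt = pvGetPt coords p4
    · simp [hs]
    · rw [if_neg hs]
      simp only [hs, decide_false, Bool.false_or]
      split_ifs <;> rename_i hc <;>
        first
          | (obtain ⟨e1, e2, e3, e4⟩ := hc; simp [e1, e2, e3, e4])
          | (rw [or4_true _ _ _ _ hc]; simp)

-- a filtered list is empty iff every element fails the filter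
lemma isEmpty_filter_eq_all {α : Type} (l : List α) (p : α → Bool) :
    (l.filter p).isEmpty = l.all (fun x => !p x) := by
  induction l with
  | nil => rfl
  | cons x t ih =>
    by_cases h : p x = true <;> simp [h, ih]

-- max? on the literal 3-element option list, as nested ifs on the three keys
lemma max3_eq {α : Type} (a b c : α) (k : α → Int) :
    PySem.List.max? [a, b, c] k =
      some (if k a < k b then (if k b < k c then c else b)
            else (if k a < k c then c else a)) := by
  simp only [PySem.List.max?, List.foldl]
  split_ifs <;> simp_all

-- ===== VERDICT =====
theorem points_on_rectangle_spec : Claim_equal_points_on_rectangle := by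
  intro coords p1 p2 p3 p4 _ _
  unfold Spec_points_on_rectangle points_on_rectangle points_on_rectangle_alt
  rw [porLoopA_eq_all, max3_eq]
  simp only [Option.getD_some, List.foldl, List.filter_filter, isEmpty_filter_eq_all]
  generalize hd2 : pvSqDist (pvGetPt coords p1) (pvGetPt coords p2) = d2
  generalize hd3 : pvSqDist (pvGetPt coords p1) (pvGetPt coords p3) = d3
  generalize hd4 : pvSqDist (pvGetPt coords p1) (pvGetPt coords p4) = d4
  congr 1
  funext pt
  by_cases h1 : d2 < d3
  · rw [if_pos h1, if_neg (show ¬ max d2 (max d3 d4) = d2 by omega)]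
    by_cases h2 : d3 < d4
    · rw [if_pos h2, if_neg (show ¬ max d2 (max d3 d4) = d3 by omega)]
      simp only [List.map, List.contains_cons, List.contains_nil]
      cases isBetween coords p1 p3 pt <;> cases isBetween coords p1 p2 pt <;>
        cases isBetween coords p4 p3 pt <;> cases isBetween coords p4 p2 pt <;> simp [← Bool.beq_eq_decide_eq]
    · rw [if_neg h2, if_pos (show max d2 (max d3 d4) = d3 by omega)]
      simp only [List.map, List.contains_cons, List.contains_nil]
      cases isBetween coords p1 p2 pt <;> cases isBetween coords p1 p4 pt <;>
        cases isBetween coords p3 p2 pt <;> cases isBetween coords p3 p4 pt <;> simp [← Bool.beq_eq_decide_eq]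
  · rw [if_neg h1]
    by_cases h3 : d2 < d4
    · rw [if_pos h3, if_neg (show ¬ max d2 (max d3 d4) = d2 by omega),
        if_neg (show ¬ max d2 (max d3 d4) = d3 by omega)]
      simp only [List.map, List.contains_cons, List.contains_nil]
      cases isBetween coords p1 p3 pt <;> cases isBetween coords p1 p2 pt <;>
        cases isBetween coords p4 p3 pt <;> cases isBetween coords p4 p2 pt <;> simp [← Bool.beq_eq_decide_eq]
    · rw [if_neg h3, if_pos (show max d2 (max d3 d4) = d2 by omega)]
      simp only [List.map, List.contains_cons, List.contains_nil]
      cases isBetween coords p1 p3 pt <;> cases isBetween coords p1 p4 pt <;>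
        cases isBetween coords p2 p3 pt <;> cases isBetween coords p2 p4 pt <;> simp [← Bool.beq_eq_decide_eq]
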